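-- pv_equiv track=rewrite | github.com/IanCarmona/Teoria-De-La-Computacion | P1_BINARIOS_1000/p1_binarios_1000.py | generar_secuencia_binaria
-- ===== SOURCE A (Python) =====
-- def generar_secuencia_binaria(k):
--     if k == 0:
--         return ["∈"]
--     elif k == 1:
--         return ["∈", "0", "1"]
--     else:
--         nueva_secuencia = ["∈", "0", "1"]
--         k_aux = 2
--         k_pos = 0
--
--         while k_aux <= k:
--             for i in range(k_pos + 1, pow(2, k_aux), 1):
--                 nueva_secuencia.append(nueva_secuencia[i] + "0")
--                 nueva_secuencia.append(nueva_secuencia[i] + "1")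
--
--             k_pos = pow(2, k_aux) - 1
--             k_aux = k_aux + 1
--
--         del nueva_secuencia[-2:]
--         return nueva_secuencia
-- ===== SOURCE B (Python) =====
-- def generar_secuencia_binaria(k):
--     res = ["∈"]
--     for L in range(1, k + 1):
--         for i in range(2 ** L):
--             res.append(format(i, '0%db' % L))
--     return res
-- ===== Notes on version B (the rewrite author's own statement) =====
-- stated objective: simpler
-- what changed: B replaces A's self-referential list growth (appending children of previously stored entries with k_pos/k_aux index bookkeeping and a final del of two overshoot entries) by directly formatting every integer 0..2^L-1 as a zero-padded binary string for each length L.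
import Mathlib
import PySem

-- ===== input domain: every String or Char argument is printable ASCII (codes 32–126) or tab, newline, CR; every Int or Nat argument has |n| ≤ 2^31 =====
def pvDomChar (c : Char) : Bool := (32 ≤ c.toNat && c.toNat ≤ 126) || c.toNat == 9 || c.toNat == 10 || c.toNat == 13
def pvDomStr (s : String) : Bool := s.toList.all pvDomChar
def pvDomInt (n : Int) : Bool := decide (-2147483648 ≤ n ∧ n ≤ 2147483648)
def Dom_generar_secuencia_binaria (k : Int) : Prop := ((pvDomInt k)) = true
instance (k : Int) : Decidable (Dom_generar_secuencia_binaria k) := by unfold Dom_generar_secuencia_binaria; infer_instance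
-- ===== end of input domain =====

-- B enumerates each length's strings directly by zero-padded binary formatting, replacing A's
-- self-referential list growth (k_pos/k_aux bookkeeping, final deletion of two overshoot
-- entries); objective: simpler.

-- ===== PORT A =====
-- one body of A's inner for-loop: two appends, each reading nueva_secuencia[i]
-- (the index is always in range when reached, so pyGet? is always some; .getD "" only discharges the option)
def pvAStep (l : List String) (i : Int) : List String :=
  let l1 := l ++ [((PySem.List.pyGet? l i).getD "") ++ "0"]
  l1 ++ [((PySem.List.pyGet? l1 i).getD "") ++ "1"]

-- the while-loop; fuel bounds the iteration count, the Python guard k_aux ≤ k is checked each turn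
def pvAWhile (k : Int) : Nat → Int → Int → List String → List String
  | 0, _, _, l => l
  | fuel + 1, k_aux, k_pos, l =>
    if k_aux ≤ k then
      pvAWhile k fuel (k_aux + 1) ((2 : Int) ^ k_aux.toNat - 1)
        ((PySem.List.pyRange (k_pos + 1) ((2 : Int) ^ k_aux.toNat) 1).foldl pvAStep l)
    else l

def generar_secuencia_binaria (k : Int) : List String :=
  if k = 0 then ["∈"]
  else if k = 1 then ["∈", "0", "1"]
  else
    let l := pvAWhile k (k - 1).toNat 2 0 ["∈", "0", "1"]
    -- del nueva_secuencia[-2:]  (what remains is nueva_secuencia[:-2])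
    PySem.List.slice l none (some (-2))

-- ===== PORT B =====
-- binary digits of n, most significant first ([] for 0); with the zero padding in pvFmt this
-- is exactly Python's format(i, '0Lb') for 0 ≤ i < 2^L
def pvBin : Nat → List Char
  | 0 => []
  | n + 1 => pvBin ((n + 1) / 2) ++ [if (n + 1) % 2 == 1 then '1' else '0']
decreasing_by omega

def pvFmt (L i : Nat) : String :=
  String.ofList (List.replicate (L - (pvBin i).length) '0' ++ pvBin i)

-- body of B's outer for-loop (the inner loop appending format(i, '0Lb') for i in range(2**L))
def pvAltBody : List String → Int → List String :=
  fun res L => (List.range (2 ^ L.toNat)).foldl (fun r i => r ++ [pvFmt L.toNat i]) res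

def generar_secuencia_binaria_alt (k : Int) : List String :=
  (PySem.List.pyRange 1 (k + 1) 1).foldl pvAltBody ["∈"]

-- ===== PRECONDITION & SPEC =====
def Spec_generar_secuencia_binaria (k : Int) (out : List String) : Prop := out = generar_secuencia_binaria_alt k
instance (k : Int) (out : List String) : Decidable (Spec_generar_secuencia_binaria k out) := by unfold Spec_generar_secuencia_binaria; infer_instance

-- ===== CLAIM (what is proved, stated in full; the proofs are below) =====
def Claim_equal_generar_secuencia_binaria : Prop := ∀ (k : Int), Dom_generar_secuencia_binaria k → Spec_generar_secuencia_binaria k (generar_secuencia_binaria k)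

-- ===== LEMMAS AND PROOFS =====

-- the block of all binary strings of length L, in numeric (= lexicographic) order
def pvRow (L : Nat) : List String := (List.range (2 ^ L)).map (pvFmt L)

-- "∈" followed by all rows 1..n : the common value of both programs at parameter n
def pvFull : Nat → List String
  | 0 => ["∈"]
  | n + 1 => pvFull n ++ pvRow (n + 1)

-- A's loop state after the round k_aux = m+1: the full result for m plus the two overshoot entries
def pvState (m : Nat) : List String := pvFull m ++ [pvFmt (m + 1) 0, pvFmt (m + 1) 1]

theorem flatMap_congr_mem {α β : Type} (l : List α) (f g : α → List β)
    (h : ∀ a ∈ l, f a = g a) : l.flatMap f = l.flatMap g := by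
  induction l with
  | nil => rfl
  | cons x xs ih =>
    simp only [List.flatMap_cons, h x (by simp), ih (fun a ha => h a (by simp [ha]))]

theorem pvBin_pos (n : Nat) (h : 0 < n) :
    pvBin n = pvBin (n / 2) ++ [if n % 2 == 1 then '1' else '0'] := by
  cases n with
  | zero => omega
  | succ m => rw [pvBin]

theorem pvBin_length {n L : Nat} (h : n < 2 ^ L) : (pvBin n).length ≤ L := by
  induction L generalizing n with
  | zero => interval_cases n; simp [pvBin]
  | succ L ih =>
    cases n with
    | zero => simp [pvBin]
    | succ m =>
      rw [pvBin]
      have h2 : (m + 1) / 2 < 2 ^ L := by have := Nat.pow_succ 2 L; omega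
      have := ih h2
      simp; omega

theorem pvFmt_bit {L n : Nat} (h : n < 2 ^ L) (b : Nat) (hb : b < 2) :
    pvFmt (L + 1) (2 * n + b) = pvFmt L n ++ String.ofList [if b == 1 then '1' else '0'] := by
  rw [pvFmt, pvFmt, ← String.ofList_append]
  congr 1
  by_cases h0 : 2 * n + b = 0
  · have hn : n = 0 := by omega
    have hbb : b = 0 := by omega
    subst hn hbb
    simp [pvBin, List.replicate_succ' (n := L)]
  · rw [pvBin_pos _ (by omega)]
    have hd : (2 * n + b) / 2 = n := by omega
    have hm : (2 * n + b) % 2 = b := by omega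
    rw [hd, hm]
    have hlen := pvBin_length h
    have hL : L + 1 - ((pvBin n).length + 1) = L - (pvBin n).length := by omega
    rw [List.length_append, List.length_singleton, hL, ← List.append_assoc]

theorem pvFmt_double {L n : Nat} (h : n < 2 ^ L) :
    pvFmt (L + 1) (2 * n) = pvFmt L n ++ "0" := by
  simpa using pvFmt_bit h 0 (by norm_num)

theorem pvFmt_double_succ {L n : Nat} (h : n < 2 ^ L) :
    pvFmt (L + 1) (2 * n + 1) = pvFmt L n ++ "1" := by
  simpa using pvFmt_bit h 1 (by norm_num)

theorem pvRange_double (n : Nat) :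
    List.range (2 * n) = (List.range n).flatMap (fun j => [2 * j, 2 * j + 1]) := by
  induction n with
  | zero => simp
  | succ n ih =>
    have : 2 * (n + 1) = (2 * n + 1) + 1 := by ring
    rw [this, List.range_succ, List.range_succ, ih, List.range_succ]
    simp

theorem pvRow_succ (L : Nat) :
    pvRow (L + 1) = (List.range (2 ^ L)).flatMap
      (fun j => [pvFmt L j ++ "0", pvFmt L j ++ "1"]) := by
  have h2 : 2 ^ (L + 1) = 2 * 2 ^ L := by rw [Nat.pow_succ]; ring
  rw [pvRow, h2, pvRange_double, List.map_flatMap]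
  apply flatMap_congr_mem
  intro j hj
  simp only [List.mem_range] at hj
  simp [pvFmt_double hj, pvFmt_double_succ hj]

theorem pvFull_length (n : Nat) : (pvFull n).length = 2 ^ (n + 1) - 1 := by
  induction n with
  | zero => simp [pvFull]
  | succ n ih =>
    simp [pvFull, pvRow, ih]
    have : 0 < 2 ^ (n + 1) := Nat.two_pow_pos _
    have := Nat.pow_succ 2 (n + 1); omega

theorem pyGet?_append_of_lt {α : Type} (l e : List α) (i : Int) (h0 : 0 ≤ i)
    (h1 : i.toNat < l.length) : PySem.List.pyGet? (l ++ e) i = PySem.List.pyGet? l i := by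
  rw [PySem.List.pyGet?_of_nonneg _ h0, PySem.List.pyGet?_of_nonneg _ h0,
      List.getElem?_append_left h1]

theorem pvAStep_in (l : List String) (i : Int) (h0 : 0 ≤ i) (h1 : i.toNat < l.length) :
    pvAStep l i = l ++ [(PySem.List.pyGet? l i).getD "" ++ "0",
                        (PySem.List.pyGet? l i).getD "" ++ "1"] := by
  rw [pvAStep]
  simp only [pyGet?_append_of_lt l _ i h0 h1]
  simp

-- a run of the inner for-loop whose reads all lie inside the initial list appends exactly
-- the children of the read elements, in order
theorem pvFoldl_step (is : List Int) (l : List String)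
    (h : ∀ i ∈ is, 0 ≤ i ∧ i.toNat < l.length) :
    is.foldl pvAStep l = l ++ is.flatMap (fun i =>
      [(PySem.List.pyGet? l i).getD "" ++ "0", (PySem.List.pyGet? l i).getD "" ++ "1"]) := by
  induction is generalizing l with
  | nil => simp
  | cons i rest ih =>
    obtain ⟨h0, h1⟩ := h i (by simp)
    rw [List.foldl_cons, pvAStep_in l i h0 h1,
        ih _ (fun a ha => ⟨(h a (by simp [ha])).1,
          by have := (h a (by simp [ha])).2; simp; omega⟩)]
    have hfm := flatMap_congr_mem rest
      (fun a => [(PySem.List.pyGet? (l ++ [(PySem.List.pyGet? l i).getD "" ++ "0",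
          (PySem.List.pyGet? l i).getD "" ++ "1"]) a).getD "" ++ "0",
        (PySem.List.pyGet? (l ++ [(PySem.List.pyGet? l i).getD "" ++ "0",
          (PySem.List.pyGet? l i).getD "" ++ "1"]) a).getD "" ++ "1"])
      (fun a => [(PySem.List.pyGet? l a).getD "" ++ "0", (PySem.List.pyGet? l a).getD "" ++ "1"])
      (fun a ha => by
        simp only [pyGet?_append_of_lt l _ a (h a (by simp [ha])).1 (h a (by simp [ha])).2])
    rw [hfm, List.flatMap_cons]
    simp

-- the element of A's state read at offset k of a round (skips fmt m 0, whose children are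
-- already present as the overshoot entries, and ends on the first overshoot entry)
theorem pvState_elem (t k : Nat) (hk : k < 2 ^ (t + 1)) :
    (PySem.List.pyGet? (pvState (t + 1)) ((2 : Int) ^ (t + 1) + (k : Int))).getD ""
      = if k < 2 ^ (t + 1) - 1 then pvFmt (t + 1) (k + 1) else pvFmt (t + 2) 0 := by
  have hcast : ((2 : Int) ^ (t + 1) + (k : Int)) = (((2 ^ (t + 1) + k : Nat) : Int)) := by
    push_cast; ring
  rw [hcast, PySem.List.pyGet?_of_nonneg _ (by positivity)]
  rw [Int.toNat_natCast]
  have hft := pvFull_length t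
  have hpos : 0 < 2 ^ (t + 1) := Nat.two_pow_pos _
  have h2 : (2 : Nat) ^ (t + 2) = 2 * 2 ^ (t + 1) := by rw [Nat.pow_succ]; ring
  show ((pvFull t ++ pvRow (t + 1) ++ [pvFmt (t + 2) 0, pvFmt (t + 2) 1])[2 ^ (t + 1) + k]?).getD "" = _
  rw [List.append_assoc, List.getElem?_append_right (by omega)]
  have hlrow : (pvRow (t + 1)).length = 2 ^ (t + 1) := by simp [pvRow]
  by_cases hk1 : k < 2 ^ (t + 1) - 1
  · rw [List.getElem?_append_left (by omega)]
    have hidx : 2 ^ (t + 1) + k - (pvFull t).length = k + 1 := by omega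
    rw [hidx, pvRow, List.getElem?_map]
    simp [List.getElem?_range (by omega : k + 1 < 2 ^ (t + 1)), hk1]
  · rw [List.getElem?_append_right (by omega)]
    have hidx : 2 ^ (t + 1) + k - (pvFull t).length - (pvRow (t + 1)).length = 0 := by omega
    rw [hidx]
    simp [hk1]

-- one full round of the while loop from state m produces state (m+1)  (m ≥ 1, stated as m = t+1)
theorem pvRound (t : Nat) :
    (PySem.List.pyRange ((2 : Int) ^ (t + 1)) ((2 : Int) ^ (t + 2)) 1).foldl pvAStep
      (pvState (t + 1)) = pvState (t + 2) := by
  have hpos : 0 < 2 ^ (t + 1) := Nat.two_pow_pos _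
  have h2 : (2 : Nat) ^ (t + 2) = 2 * 2 ^ (t + 1) := by rw [Nat.pow_succ]; ring
  have hft := pvFull_length (t + 1)
  have hcast : ((2 : Int) ^ (t + 2) - (2 : Int) ^ (t + 1)).toNat = 2 ^ (t + 1) := by
    have : ((2 : Int) ^ (t + 2)) = ((2 ^ (t + 2) : Nat) : Int) := by push_cast; ring
    have h1 : ((2 : Int) ^ (t + 1)) = ((2 ^ (t + 1) : Nat) : Int) := by push_cast; ring
    rw [this, h1]; omega
  rw [PySem.List.pyRange_one, hcast]
  have hlen : (pvState (t + 1)).length = 2 ^ (t + 2) + 1 := by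
    simp [pvState]; omega
  rw [pvFoldl_step]
  · simp only [List.flatMap_map]
    have hbody : (List.range (2 ^ (t + 1))).flatMap
        (fun a : Nat => [(PySem.List.pyGet? (pvState (t + 1)) ((2 : Int) ^ (t + 1) + (a : Int))).getD "" ++ "0",
                 (PySem.List.pyGet? (pvState (t + 1)) ((2 : Int) ^ (t + 1) + (a : Int))).getD "" ++ "1"])
      = (List.range (2 ^ (t + 1))).flatMap
        (fun k => if k < 2 ^ (t + 1) - 1
          then [pvFmt (t + 1) (k + 1) ++ "0", pvFmt (t + 1) (k + 1) ++ "1"]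
          else [pvFmt (t + 2) 0 ++ "0", pvFmt (t + 2) 0 ++ "1"]) := by
      apply flatMap_congr_mem
      intro k hk
      rw [pvState_elem t k (List.mem_range.mp hk)]
      by_cases hk1 : k < 2 ^ (t + 1) - 1 <;> simp [hk1]
    rw [hbody]
    -- split off the last index k = 2^(t+1)-1
    have hr : List.range (2 ^ (t + 1)) = List.range (2 ^ (t + 1) - 1) ++ [2 ^ (t + 1) - 1] := by
      conv_lhs => rw [show 2 ^ (t + 1) = (2 ^ (t + 1) - 1) + 1 by omega, List.range_succ]
    rw [hr, List.flatMap_append]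
    have hpart1 : (List.range (2 ^ (t + 1) - 1)).flatMap
        (fun k => if k < 2 ^ (t + 1) - 1
          then [pvFmt (t + 1) (k + 1) ++ "0", pvFmt (t + 1) (k + 1) ++ "1"]
          else [pvFmt (t + 2) 0 ++ "0", pvFmt (t + 2) 0 ++ "1"])
      = (List.range (2 ^ (t + 1) - 1)).flatMap
        (fun k => [pvFmt (t + 1) (k + 1) ++ "0", pvFmt (t + 1) (k + 1) ++ "1"]) := by
      apply flatMap_congr_mem
      intro k hk
      simp [List.mem_range.mp hk]
    rw [hpart1]
    have hRow : pvRow (t + 2) = [pvFmt (t + 2) 0, pvFmt (t + 2) 1] ++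
        (List.range (2 ^ (t + 1) - 1)).flatMap
          (fun k => [pvFmt (t + 1) (k + 1) ++ "0", pvFmt (t + 1) (k + 1) ++ "1"]) := by
      rw [pvRow_succ (t + 1)]
      conv_lhs => rw [show 2 ^ (t + 1) = (2 ^ (t + 1) - 1) + 1 by omega,
        List.range_succ_eq_map, List.flatMap_cons, List.flatMap_map]
      have c0 : pvFmt (t + 1) 0 ++ "0" = pvFmt (t + 2) 0 := by
        have := pvFmt_double (L := t + 1) (n := 0) (by positivity); simpa using this.symm
      have c1 : pvFmt (t + 1) 0 ++ "1" = pvFmt (t + 2) 1 := by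
        have := pvFmt_double_succ (L := t + 1) (n := 0) (by positivity); simpa using this.symm
      rw [c0, c1]
    have e0 : pvFmt (t + 2) 0 ++ "0" = pvFmt (t + 3) 0 := by
      have := pvFmt_double (L := t + 2) (n := 0) (by positivity); simpa using this.symm
    have e1 : pvFmt (t + 2) 0 ++ "1" = pvFmt (t + 3) 1 := by
      have := pvFmt_double_succ (L := t + 2) (n := 0) (by positivity); simpa using this.symm
    simp only [List.flatMap_cons, List.flatMap_nil, List.append_nil]
    rw [if_neg (show ¬(2 ^ (t + 1) - 1 < 2 ^ (t + 1) - 1) by omega)]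
    rw [e0, e1]
    show pvState (t + 1) ++ _ = _
    simp only [pvState, pvFull, hRow]
    simp [List.append_assoc]
  · intro i hi
    simp only [List.mem_map, List.mem_range] at hi
    obtain ⟨kk, hkk, rfl⟩ := hi
    constructor
    · positivity
    · have : ((2 : Int) ^ (t + 1) + (kk : Int)).toNat = 2 ^ (t + 1) + kk := by
        have h1 : ((2 : Int) ^ (t + 1)) = ((2 ^ (t + 1) : Nat) : Int) := by push_cast; ring
        rw [h1]; omega
      rw [this, hlen]; omega

theorem pvWhileInv (fuel : Nat) : ∀ (k : Int) (t : Nat),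
    (t : Int) + 1 ≤ k → k ≤ (t : Int) + 1 + fuel →
    pvAWhile k fuel ((t : Int) + 2) ((2 : Int) ^ (t + 1) - 1) (pvState (t + 1))
      = pvState k.toNat := by
  induction fuel with
  | zero =>
    intro k t h1 h2
    have : k.toNat = t + 1 := by omega
    rw [pvAWhile, this]
  | succ fuel ih =>
    intro k t h1 h2
    rw [pvAWhile]
    by_cases hg : (t : Int) + 2 ≤ k
    · rw [if_pos hg]
      have htn : (((t : Int) + 2)).toNat = t + 2 := by omega
      rw [htn]
      have harg : (2 : Int) ^ (t + 1) - 1 + 1 = (2 : Int) ^ (t + 1) := by ring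
      rw [harg, pvRound t]
      have := ih k (t + 1) (by push_cast; omega) (by push_cast at h2 ⊢; omega)
      convert this using 2
    · rw [if_neg hg]
      have : k.toNat = t + 1 := by omega
      rw [this]

theorem pvAlt_nat (n : Nat) :
    (PySem.List.pyRange 1 ((n : Int) + 1) 1).foldl pvAltBody ["∈"] = pvFull n := by
  induction n with
  | zero => rw [PySem.List.pyRange_one_eq_nil (by norm_num)]; rfl
  | succ n ih =>
    have hsplit : PySem.List.pyRange 1 (((n + 1 : Nat) : Int) + 1) 1
        = PySem.List.pyRange 1 ((n : Int) + 1) 1 ++ [(n : Int) + 1] := by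
      have := PySem.List.pyRange_one_succ_right (a := 1) (b := (n : Int) + 1) (by omega)
      push_cast
      push_cast at this
      exact this
    rw [hsplit, List.foldl_append, ih]
    show (List.range (2 ^ ((n : Int) + 1).toNat)).foldl
      (fun r i => r ++ [pvFmt ((n : Int) + 1).toNat i]) (pvFull n) = _
    have htn : ((n : Int) + 1).toNat = n + 1 := by omega
    rw [htn, PySem.List.foldl_append_singleton_eq_map]
    rfl

theorem alt_eq (k : Int) : generar_secuencia_binaria_alt k = pvFull k.toNat := by
  by_cases hk : 0 ≤ k
  · rw [generar_secuencia_binaria_alt, show k = ((k.toNat : Nat) : Int) by omega]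
    exact pvAlt_nat k.toNat
  · rw [generar_secuencia_binaria_alt, PySem.List.pyRange_one_eq_nil (by omega),
      show k.toNat = 0 by omega]
    rfl

theorem a_eq (k : Int) : generar_secuencia_binaria k = pvFull k.toNat := by
  rw [generar_secuencia_binaria]
  by_cases h0 : k = 0
  · subst h0; rfl
  rw [if_neg h0]
  by_cases h1 : k = 1
  · subst h1
    rw [if_pos rfl]
    simp [pvFull, pvRow, pvFmt, pvBin, List.range_succ]
  rw [if_neg h1]
  by_cases hneg : k < 0
  · rw [show (k - 1).toNat = 0 by omega]
    show PySem.List.slice (pvAWhile k 0 2 0 ["∈", "0", "1"]) none (some (-2)) = _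
    rw [pvAWhile, show k.toNat = 0 by omega]
    decide
  · have hk2 : 2 ≤ k := by omega
    rw [show (k - 1).toNat = (k - 2).toNat + 1 by omega, pvAWhile, if_pos hk2]
    have hfirst : (PySem.List.pyRange (0 + 1) ((2 : Int) ^ (2 : Int).toNat) 1).foldl
        pvAStep ["∈", "0", "1"] = ["∈", "0", "1", "00", "01", "10", "11", "000", "001"] := by
      decide
    rw [hfirst, show (["∈", "0", "1", "00", "01", "10", "11", "000", "001"] : List String)
      = pvState 2 from by simp [pvState, pvFull, pvRow, pvFmt, pvBin, List.range_succ]]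
    have hw := pvWhileInv (k - 2).toNat k 1 (by omega) (by omega)
    have harg : pvAWhile k (k - 2).toNat (2 + 1) ((2 : Int) ^ (2 : Int).toNat - 1) (pvState 2)
        = pvState k.toNat := by
      convert hw using 2
    rw [harg]
    rw [PySem.List.slice_to_neg_ofNat _ 2 (by norm_num)]
    rw [show (pvState k.toNat).length - 2 = (pvFull k.toNat).length from by simp [pvState]]
    rw [pvState, List.take_left]

-- ===== VERDICT (by name: the statement is the Claim_ definition above) =====
theorem generar_secuencia_binaria_spec : Claim_equal_generar_secuencia_binaria := by
  intro k _
  unfold Spec_generar_secuencia_binaria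
  rw [a_eq, alt_eq]
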